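-- pv_equiv track=rewrite | github.com/tjoanlie/trim_video | player.py | list2text
-- ===== SOURCE A (Python) =====
-- def second2time(in_sec):
--     """ convert seconds into HH:MM:SS """
--     sec = str(in_sec % 60)
--     min = str(in_sec // 60)
--     hr  = str(in_sec // 3600)
--     if len(sec) == 1:
--         sec = '0' + sec
--     if len(min) == 1:
--         min = '0' + min
--     if len(hr) == 1:
--         hr = '0' + hr
--     return hr + ':' + min + ':' + sec
--
-- def list2text(in_list):
--     """ convert list into simple text """
--     out_text = ''
--     count = 0
--     for val in in_list:
--         if out_text == '':
--             out_text = second2time(val)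
--         else:
--             if out_text[-2:] == "; ":
--                 out_text = out_text + second2time(val)
--             else:
--                 out_text = out_text + ' - ' + second2time(val)
--         count += 1
--         if count % 2 == 0:
--             out_text += '; '
--     return out_text
-- ===== SOURCE B (Python) =====
-- def second2time(in_sec):
--     """ convert seconds into HH:MM:SS """
--     sec = str(in_sec % 60)
--     min = str(in_sec // 60)
--     hr  = str(in_sec // 3600)
--     if len(sec) == 1:
--         sec = '0' + sec
--     if len(min) == 1:
--         min = '0' + min
--     if len(hr) == 1:
--         hr = '0' + hr
--     return hr + ':' + min + ':' + sec
--
-- def list2text(in_list):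
--     """ convert list into simple text: pairs joined by ' - ', each full pair closed by '; ' """
--     pieces = []
--     for i in range(0, len(in_list), 2):
--         chunk = in_list[i:i+2]
--         piece = ' - '.join(second2time(v) for v in chunk)
--         if len(chunk) == 2:
--             piece += '; '
--         pieces.append(piece)
--     return ''.join(pieces)
-- ===== Notes on version B (the rewrite author's own statement) =====
-- stated objective: faster
-- what changed: Replaces A's string-suffix state machine (repeated out_text concatenation with out_text[-2:] == '; ' and count % 2 tests) with a direct traversal in chunks of two that formats each pair and joins the collected pieces once.
import Mathlib
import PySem

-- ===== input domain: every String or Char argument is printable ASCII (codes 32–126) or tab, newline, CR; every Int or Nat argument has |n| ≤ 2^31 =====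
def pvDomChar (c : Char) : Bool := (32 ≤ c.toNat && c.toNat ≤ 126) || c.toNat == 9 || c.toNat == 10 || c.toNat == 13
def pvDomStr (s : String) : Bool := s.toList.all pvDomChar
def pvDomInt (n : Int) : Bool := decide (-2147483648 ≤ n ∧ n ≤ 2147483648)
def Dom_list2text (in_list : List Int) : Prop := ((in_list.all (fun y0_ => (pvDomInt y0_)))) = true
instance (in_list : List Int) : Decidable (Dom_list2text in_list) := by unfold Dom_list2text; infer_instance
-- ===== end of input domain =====

-- B replaces A's suffix-test state machine with an explicit pairwise (chunks-of-two) traversal; equal return value on all inputs.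
-- Strings are handled as List Char (PySem.Chars level) and converted once at the end, since Lean's String ops are kernel-opaque.

-- ===== PORT A =====
-- shared module helper second2time, on List Char
def second2timeC (in_sec : Int) : List Char :=
  let sec := PySem.Int.toChars (PySem.Int.mod in_sec 60)
  let min := PySem.Int.toChars (PySem.Int.floordiv in_sec 60)
  let hr  := PySem.Int.toChars (PySem.Int.floordiv in_sec 3600)
  let sec := if sec.length = 1 then '0' :: sec else sec
  let min := if min.length = 1 then '0' :: min else min
  let hr  := if hr.length = 1 then '0' :: hr else hr
  hr ++ [':'] ++ min ++ [':'] ++ sec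

-- one iteration of A's loop body, state = (out_text, count)
def list2textStep (st : List Char × Int) (val : Int) : List Char × Int :=
  let out := if st.1 = [] then second2timeC val
    else if PySem.List.slice st.1 (some (-2)) none = [';', ' '] then st.1 ++ second2timeC val
    else st.1 ++ [' ', '-', ' '] ++ second2timeC val
  let count := st.2 + 1
  let out := if PySem.Int.mod count 2 = 0 then out ++ [';', ' '] else out
  (out, count)

def list2text (in_list : List Int) : String :=
  String.ofList (in_list.foldl list2textStep ([], 0)).1

-- ===== PORT B =====
-- B's chunk loop: each iteration consumes the next chunk in_list[i:i+2]
def list2textChunks : List Int → List Char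
  | [] => []
  | [a] => second2timeC a
  | a :: b :: rest =>
      (second2timeC a ++ [' ', '-', ' '] ++ second2timeC b ++ [';', ' ']) ++ list2textChunks rest

def list2text_alt (in_list : List Int) : String :=
  String.ofList (list2textChunks in_list)

-- ===== PRECONDITION & SPEC =====
def Spec_list2text (in_list : List Int) (out : String) : Prop := out = list2text_alt in_list
instance (in_list : List Int) (out : String) : Decidable (Spec_list2text in_list out) := by unfold Spec_list2text; infer_instance

-- ===== CLAIM (what is proved, stated in full; the proofs are below) =====
def Claim_equal_list2text : Prop := ∀ (in_list : List Int), Dom_list2text in_list → Spec_list2text in_list (list2text in_list)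

-- ===== LEMMAS AND PROOFS =====

-- the padded seconds field is nonempty and ends in a digit, never ' ' (checked for all 60 residues)
lemma secPad_spec : ∀ m : Fin 60,
    (if (PySem.Int.toChars (m : Int)).length = 1 then '0' :: PySem.Int.toChars (m : Int)
     else PySem.Int.toChars (m : Int)) ≠ [] ∧
    (if (PySem.Int.toChars (m : Int)).length = 1 then '0' :: PySem.Int.toChars (m : Int)
     else PySem.Int.toChars (m : Int)).getLast? ≠ some ' ' := by decide

lemma getLast?_append_right {α : Type} (s t : List α) (h : t ≠ []) :
    (s ++ t).getLast? = t.getLast? := by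
  cases t with
  | nil => exact absurd rfl h
  | cons x xs =>
      rw [List.getLast?_append, List.getLast?_eq_some_getLast (l := x :: xs) (by simp), Option.some_or]

lemma second2timeC_ne_nil (v : Int) : second2timeC v ≠ [] := by
  simp only [second2timeC]
  split <;> simp

lemma second2timeC_getLast_ne_space (v : Int) : (second2timeC v).getLast? ≠ some ' ' := by
  have h1 : 0 ≤ PySem.Int.mod v 60 := PySem.Int.mod_nonneg v (by norm_num)
  have h2 : PySem.Int.mod v 60 < 60 := PySem.Int.mod_lt v (by norm_num)
  obtain ⟨hne, hlast⟩ := secPad_spec ⟨(PySem.Int.mod v 60).toNat, by omega⟩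
  simp only [Int.toNat_of_nonneg h1] at hne hlast
  simp only [second2timeC]
  rw [getLast?_append_right _ _ hne]
  exact hlast

-- a list whose last char is not ' ' has no slice[-2:] equal to "; "
lemma slice_ne_semispace (xs : List Char) (h : xs.getLast? ≠ some ' ') :
    PySem.List.slice xs (some (-2)) none ≠ [';', ' '] := by
  rw [PySem.List.slice_from_neg_ofNat xs 2 (by omega)]
  intro hc
  have hd := List.getLast?_drop (i := xs.length - 2) (l := xs)
  rw [hc] at hd
  by_cases hle : xs.length ≤ xs.length - 2
  · rw [if_pos hle] at hd; simp at hd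
  · rw [if_neg hle] at hd
    simp at hd
    exact h hd.symm

lemma slice_last_two (ys : List Char) :
    PySem.List.slice (ys ++ [';', ' ']) (some (-2)) none = [';', ' '] := by
  rw [PySem.List.slice_from_neg_ofNat _ 2 (by omega)]
  simp

-- main loop invariant: from an even count and a state that is empty or ends in "; ",
-- A's loop appends exactly B's chunk rendering
lemma loop_eq_chunks (l : List Int) : ∀ (s : List Char) (c : Int),
    (2 : Int) ∣ c →
    (s = [] ∨ PySem.List.slice s (some (-2)) none = [';', ' ']) →
    (l.foldl list2textStep (s, c)).1 = s ++ list2textChunks l := by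
  induction l using list2textChunks.induct with
  | case1 => intro s c _ _; simp [list2textChunks]
  | case2 a =>
      intro s c hc hs
      have hd1 : ¬ (2 : Int) ∣ (c + 1) := by omega
      have he1 : (c + 1) % 2 = 1 := by omega
      rcases hs with rfl | hs
      · simp [List.foldl, list2textStep, he1, list2textChunks]
      · have hne : s ≠ [] := by rintro rfl; simp [PySem.List.slice] at hs
        simp [List.foldl, list2textStep, hne, hs, he1, list2textChunks]
  | case3 a b rest ih =>
      intro s c hc hs
      have hd1 : ¬ (2 : Int) ∣ (c + 1) := by omega
      have he1 : (c + 1) % 2 = 1 := by omega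
      have hd2 : (2 : Int) ∣ (c + 1 + 1) := by omega
      have he2 : (c + 1 + 1) % 2 = 0 := by omega
      have hstep1 : list2textStep (s, c) a =
          ((if s = [] then second2timeC a else s ++ second2timeC a), c + 1) := by
        rcases hs with rfl | hs
        · simp [list2textStep, he1]
        · have hne : s ≠ [] := by rintro rfl; simp [PySem.List.slice] at hs
          simp [list2textStep, hne, hs, he1]
      set s1 : List Char := if s = [] then second2timeC a else s ++ second2timeC a with hs1
      have hs1last : s1.getLast? ≠ some ' ' := by
        rw [hs1]; split
        · exact second2timeC_getLast_ne_space a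
        · rw [getLast?_append_right _ _ (second2timeC_ne_nil a)]
          exact second2timeC_getLast_ne_space a
      have hs1ne : s1 ≠ [] := by
        rw [hs1]; split
        · exact second2timeC_ne_nil a
        · simp [second2timeC_ne_nil a]
      have hstep2 : list2textStep (s1, c + 1) b =
          (s1 ++ [' ', '-', ' '] ++ second2timeC b ++ [';', ' '], c + 1 + 1) := by
        simp [list2textStep, hs1ne, slice_ne_semispace s1 hs1last, he2]
      have hs2 : s1 ++ [' ', '-', ' '] ++ second2timeC b ++ [';', ' ']
          = s ++ (second2timeC a ++ [' ', '-', ' '] ++ second2timeC b ++ [';', ' ']) := by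
        rcases hs with rfl | hs
        · rw [hs1, if_pos rfl]; simp
        · have hne : s ≠ [] := by rintro rfl; simp [PySem.List.slice] at hs
          rw [hs1, if_neg hne]; simp
      have hsuffix : PySem.List.slice
          (s1 ++ [' ', '-', ' '] ++ second2timeC b ++ [';', ' ']) (some (-2)) none = [';', ' '] := by
        rw [show s1 ++ [' ', '-', ' '] ++ second2timeC b ++ [';', ' ']
            = (s1 ++ [' ', '-', ' '] ++ second2timeC b) ++ [';', ' '] by simp]
        exact slice_last_two _
      calc ((a :: b :: rest).foldl list2textStep (s, c)).1
          = (rest.foldl list2textStep (list2textStep (list2textStep (s, c) a) b)).1 := by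
            simp [List.foldl]
        _ = s ++ (second2timeC a ++ [' ', '-', ' '] ++ second2timeC b ++ [';', ' ']) ++
              list2textChunks rest := by
            rw [hstep1, hstep2,
              ih _ _ (by omega) (Or.inr hsuffix), hs2, List.append_assoc]
        _ = s ++ list2textChunks (a :: b :: rest) := by
            simp [list2textChunks]

-- ===== VERDICT (by name: the statement is the Claim_ definition above) =====
theorem list2text_spec : Claim_equal_list2text := by
  intro l _
  unfold Spec_list2text list2text list2text_alt
  rw [loop_eq_chunks l [] 0 ⟨0, by norm_num⟩ (Or.inl rfl)]
  simp
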